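-- pv_equiv track=rewrite | github.com/HaaaBird/TIL | Algorithm/bj_2578_2.py | horizontal_check
-- ===== SOURCE A (Python) =====
-- def horizontal_check(array):
--     bingo_count = 0
--     col_sum = 0
--     for x in range(len(array)):
--         col_sum = 0
--         for y in range(len(array)):
--             col_sum += array[y][x]
--         if col_sum == 0:
--             bingo_count += 1
--     return bingo_count
-- ===== SOURCE B (Python) =====
-- def horizontal_check(array):
--     n = len(array)
--
--     def col_totals(rows):
--         if not rows:
--             return [0] * n
--         rest = col_totals(rows[1:])
--         head = rows[0]
--         return [rest[i] + head[i] for i in range(n)]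
--
--     return sum(1 for s in col_totals(array) if s == 0)
-- ===== Notes on version B (the rewrite author's own statement) =====
-- stated objective: alternative
-- what changed: B replaces A's nested index loops (for each column, rescan all rows with a scalar accumulator) by structural recursion on the list of rows that builds the vector of column totals by elementwise addition, then counts zeros with a generator-sum; no index loop over rows remains.
import Mathlib
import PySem

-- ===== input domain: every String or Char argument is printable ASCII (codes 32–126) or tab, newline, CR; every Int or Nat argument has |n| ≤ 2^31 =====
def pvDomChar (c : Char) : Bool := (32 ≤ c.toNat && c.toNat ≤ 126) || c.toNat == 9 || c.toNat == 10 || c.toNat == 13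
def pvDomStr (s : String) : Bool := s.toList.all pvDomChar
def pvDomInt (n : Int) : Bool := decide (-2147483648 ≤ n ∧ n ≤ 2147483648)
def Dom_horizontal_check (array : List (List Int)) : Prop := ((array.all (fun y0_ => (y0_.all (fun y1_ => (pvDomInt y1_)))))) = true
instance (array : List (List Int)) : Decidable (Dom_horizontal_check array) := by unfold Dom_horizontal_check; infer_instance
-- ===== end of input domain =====

-- B replaces A's nested index loops by structural recursion on the rows building the column-totals vector elementwise, plus a counting pass (alternative decomposition, same cost).


-- ===== PORT A =====
def horizontal_check (array : List (List Int)) : Int :=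
  (PySem.List.pyRange 0 (array.length : Int) 1).foldl (fun bingo_count x =>
    let col_sum := (PySem.List.pyRange 0 (array.length : Int) 1).foldl
      (fun col_sum y => col_sum + PySem.List.pyGetD (PySem.List.pyGetD array y []) x 0) 0
    if col_sum = 0 then bingo_count + 1 else bingo_count) 0

-- ===== PORT B =====
-- col_totals: structural recursion on the rows, elementwise addition (rest[i] + head[i]).
def col_totals (n : Nat) : List (List Int) → List Int
  | [] => List.replicate n 0
  | head :: rows =>
    let rest := col_totals n rows
    (List.range n).map (fun (i : Nat) =>
      PySem.List.pyGetD rest (i : Int) 0 + PySem.List.pyGetD head (i : Int) 0)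

def horizontal_check_alt (array : List (List Int)) : Int :=
  (col_totals array.length array).foldl (fun c s => if s = 0 then c + 1 else c) 0

-- ===== PRECONDITION & SPEC =====
-- Pre_ excludes exactly the inputs where Python A raises IndexError: a row shorter than the number of rows.
def Pre_horizontal_check (array : List (List Int)) : Prop :=
  ∀ row ∈ array, array.length ≤ row.length
instance (array : List (List Int)) : Decidable (Pre_horizontal_check array) := by
  unfold Pre_horizontal_check; infer_instance
def pvWitness_horizontal_check : List (List Int) := [[1, -1], [-1, 1]]
def Spec_horizontal_check (array : List (List Int)) (out : Int) : Prop := out = horizontal_check_alt array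
instance (array : List (List Int)) (out : Int) : Decidable (Spec_horizontal_check array out) := by unfold Spec_horizontal_check; infer_instance

-- ===== CLAIM (what is proved, stated in full; the proofs are below) =====
def Claim_equal_horizontal_check : Prop := ∀ (array : List (List Int)), Dom_horizontal_check array → Pre_horizontal_check array → Spec_horizontal_check array (horizontal_check array)

-- ===== LEMMAS AND PROOFS =====

-- array[y][x] as A reads it (total default form).
def gA (array : List (List Int)) (y x : Int) : Int :=
  PySem.List.pyGetD (PySem.List.pyGetD array y []) x 0

-- column total of column x over the first m rows, index-based (A's reading order)
def csum (array : List (List Int)) (m : Nat) (x : Int) : Int :=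
  ((List.range m).map (fun y : Nat => gA array (y : Int) x)).sum

-- column total of column x, structural over the rows (B's reading order)
def rsum (rows : List (List Int)) (x : Int) : Int :=
  (rows.map (fun r => PySem.List.pyGetD r x 0)).sum

-- A's inner loop: the total of column x
def colsumA (array : List (List Int)) (x : Int) : Int :=
  (PySem.List.pyRange 0 (array.length : Int) 1).foldl
    (fun col_sum y => col_sum + PySem.List.pyGetD (PySem.List.pyGetD array y []) x 0) 0

theorem colsumA_eq (array : List (List Int)) (x : Int) :
    colsumA array x = csum array array.length x := by
  unfold colsumA
  rw [PySem.List.pyRange_zero_nat, List.foldl_map, PySem.List.foldl_add]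
  simp [csum, gA]

theorem csum_eq_rsum (rows : List (List Int)) (x : Int) :
    csum rows rows.length x = rsum rows x := by
  induction rows with
  | nil => simp [csum, rsum]
  | cons r rs ih =>
    simp only [csum, rsum, List.length_cons, List.range_succ_eq_map, List.map_cons,
      List.map_map, List.sum_cons] at *
    have h0 : gA (r :: rs) ((0 : Nat) : Int) x = PySem.List.pyGetD r x 0 := by
      simp [gA]
    rw [h0]
    congr 1
    rw [← ih]
    apply congrArg
    apply List.map_congr_left
    intro y _
    show PySem.List.pyGetD (PySem.List.pyGetD (r :: rs) ((y : Int) + 1) []) x 0 = _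
    rw [show ((y : Int) + 1) = (((y + 1 : Nat)) : Int) by push_cast; ring,
        PySem.List.pyGetD_natCast, List.getD_cons_succ]
    simp [gA, PySem.List.pyGetD_natCast, List.getD]

theorem col_totals_eq (rows : List (List Int)) (n : Nat) :
    col_totals n rows = (List.range n).map (fun k : Nat => rsum rows (k : Int)) := by
  induction rows with
  | nil =>
    apply List.ext_getElem
    · simp [col_totals]
    · intro i hi1 hi2
      simp [col_totals, rsum]
  | cons r rs ih =>
    rw [col_totals, ih]
    apply List.map_congr_left
    intro k hk
    simp only [List.mem_range] at hk
    rw [PySem.List.pyGetD_natCast, PySem.List.getD_map_range _ _ _ _ hk]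
    simp [rsum, add_comm]

theorem A_fold (array : List (List Int)) (l : List Int) (acc : Int) :
    l.foldl (fun bingo_count x =>
      let col_sum := (PySem.List.pyRange 0 (array.length : Int) 1).foldl
        (fun col_sum y => col_sum + PySem.List.pyGetD (PySem.List.pyGetD array y []) x 0) 0
      if col_sum = 0 then bingo_count + 1 else bingo_count) acc
    = acc + (l.countP (fun x => decide (colsumA array x = 0)) : Int) := by
  induction l generalizing acc with
  | nil => simp
  | cons a l ih =>
    simp only [List.foldl_cons, List.countP_cons]
    rw [ih]
    show (if colsumA array a = 0 then acc + 1 else acc) + _ = _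
    by_cases h : colsumA array a = 0
    · simp [h]; ring
    · simp [h]

theorem A_eq (array : List (List Int)) :
    horizontal_check array
      = ((List.range array.length).countP (fun k : Nat => decide (rsum array (k : Int) = 0)) : Int) := by
  unfold horizontal_check
  rw [A_fold, PySem.List.pyRange_zero_nat, List.countP_map, zero_add]
  congr 1
  apply List.countP_congr
  intro k _
  simp [Function.comp, colsumA_eq, csum_eq_rsum]

theorem B_eq (array : List (List Int)) :
    horizontal_check_alt array
      = ((List.range array.length).countP (fun k : Nat => decide (rsum array (k : Int) = 0)) : Int) := by
  unfold horizontal_check_alt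
  rw [col_totals_eq, PySem.List.foldl_ite_add_one (fun s : Int => s = 0), List.countP_map, zero_add]
  rfl

-- ===== VERDICT (by name: the statement is the Claim_ definition above) =====
theorem horizontal_check_spec : Claim_equal_horizontal_check := by
  intro array _ _
  unfold Spec_horizontal_check
  rw [A_eq, B_eq]
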